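-- pv_equiv track=rewrite | github.com/ehg1506/AIS | loc_check.py | monthly_filter
-- ===== SOURCE A (Python) =====
-- def monthly_filter(timelist,mmsi,timestamps,monthly_list):
--     for i in range(0,len(timelist)):
--         for j in range(1,len(timestamps)):
--             if j== 0:
--                 if timelist[i] < timestamps[j+1]:
--                     monthly_list[j].append(mmsi[i])
--             else:
--                 if timelist[i] > timestamps[j-1] and timelist[i] < timestamps[j]:
--                     monthly_list[j].append(mmsi[i])
--     return monthly_list
-- ===== SOURCE B (Python) =====
-- # Different algorithm: sort the timestamps' indices by time once, then locate each
-- # bucket's members with hand-written binary searches (bisect_right/bisect_left) into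
-- # the sorted keys; the selected original indices are re-sorted so each bucket receives
-- # the mmsi values in the same input order as A.  Mutates monthly_list in place like A.
-- def _bisect_right(a, x):
--     lo, hi = 0, len(a)
--     while lo < hi:
--         mid = (lo + hi) // 2
--         if x < a[mid]:
--             hi = mid
--         else:
--             lo = mid + 1
--     return lo
--
-- def _bisect_left(a, x):
--     lo, hi = 0, len(a)
--     while lo < hi:
--         mid = (lo + hi) // 2
--         if a[mid] < x:
--             lo = mid + 1
--         else:
--             hi = mid
--     return lo
--
-- def monthly_filter(timelist, mmsi, timestamps, monthly_list):
--     order = sorted(range(len(timelist)), key=lambda i: timelist[i])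
--     keys = [timelist[i] for i in order]
--     for j in range(1, len(timestamps)):
--         sel = sorted(order[_bisect_right(keys, timestamps[j - 1]):_bisect_left(keys, timestamps[j])])
--         if sel:
--             monthly_list[j].extend(mmsi[i] for i in sel)
--     return monthly_list
-- ===== Notes on version B (the rewrite author's own statement) =====
-- stated objective: faster
-- what changed: B replaces A's full nested scan with sort + binary search: it sorts the element indices by time once, locates each bucket's members by bisecting into the sorted keys, and re-sorts the selected indices so each bucket is filled in A's append order.
import Mathlib
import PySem

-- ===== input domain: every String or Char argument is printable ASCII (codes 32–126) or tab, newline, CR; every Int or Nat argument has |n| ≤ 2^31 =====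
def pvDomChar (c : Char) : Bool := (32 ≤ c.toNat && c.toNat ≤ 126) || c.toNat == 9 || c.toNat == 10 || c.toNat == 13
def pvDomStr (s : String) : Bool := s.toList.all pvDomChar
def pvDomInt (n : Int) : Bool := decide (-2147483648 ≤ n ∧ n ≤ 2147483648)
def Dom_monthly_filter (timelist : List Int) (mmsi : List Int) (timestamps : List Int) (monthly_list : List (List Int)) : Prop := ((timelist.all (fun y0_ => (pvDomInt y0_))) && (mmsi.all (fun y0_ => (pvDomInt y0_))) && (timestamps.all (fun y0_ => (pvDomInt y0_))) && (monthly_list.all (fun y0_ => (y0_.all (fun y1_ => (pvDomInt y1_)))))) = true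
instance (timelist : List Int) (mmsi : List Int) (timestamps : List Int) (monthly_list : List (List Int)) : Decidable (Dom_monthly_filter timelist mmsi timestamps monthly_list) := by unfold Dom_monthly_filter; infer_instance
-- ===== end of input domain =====

-- B replaces A's nested scan by sort + binary search: the element indices are sorted by time
-- once, each bucket's members are located by bisecting into the sorted keys, and the selected
-- indices are re-sorted so each bucket is appended to in the same input order as A.
-- Both mutate monthly_list in place; the equivalence proved is about the return value.

-- ===== PORT A =====
def monthly_filter (timelist : List Int) (mmsi : List Int) (timestamps : List Int) (monthly_list : List (List Int)) : List (List Int) :=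
  (PySem.List.pyRange 0 (timelist.length : Int) 1).foldl (fun ml i =>
    (PySem.List.pyRange 1 (timestamps.length : Int) 1).foldl (fun ml j =>
      if j == 0 then
        (if PySem.List.pyGetD timelist i 0 < PySem.List.pyGetD timestamps (j+1) 0 then
           ml.modify j.toNat (fun b => b ++ [PySem.List.pyGetD mmsi i 0]) else ml)
      else
        (if PySem.List.pyGetD timelist i 0 > PySem.List.pyGetD timestamps (j-1) 0 ∧
            PySem.List.pyGetD timelist i 0 < PySem.List.pyGetD timestamps j 0 then
           ml.modify j.toNat (fun b => b ++ [PySem.List.pyGetD mmsi i 0]) else ml)) ml) monthly_list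

-- ===== PORT B =====
-- Source B's hand-written _bisect_right/_bisect_left are, step for step, the loops of
-- PySem.List.bisectRight/bisectLeft (lo/hi bracket, mid = (lo+hi)//2, same comparison
-- and same updates), so the port uses those names for them.
-- order = sorted(range(len(timelist)), key=lambda i: timelist[i])
def pvOrder (timelist : List Int) : List Int :=
  PySem.List.sorted (PySem.List.pyRange 0 (timelist.length : Int) 1)
    (fun i => PySem.List.pyGetD timelist i 0) false
-- keys = [timelist[i] for i in order]
def pvKeys (timelist : List Int) : List Int :=
  (pvOrder timelist).map (fun i => PySem.List.pyGetD timelist i 0)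

def monthly_filter_alt (timelist : List Int) (mmsi : List Int) (timestamps : List Int) (monthly_list : List (List Int)) : List (List Int) :=
  (PySem.List.pyRange 1 (timestamps.length : Int) 1).foldl (fun ml j =>
    let sel := PySem.List.sorted
      (PySem.List.slice (pvOrder timelist)
        (some ((PySem.List.bisectRight (pvKeys timelist) (PySem.List.pyGetD timestamps (j-1) 0) : Nat) : Int))
        (some ((PySem.List.bisectLeft (pvKeys timelist) (PySem.List.pyGetD timestamps j 0) : Nat) : Int)))
      (fun x => x) false
    if sel.isEmpty then ml
    else ml.modify j.toNat (fun b => b ++ sel.map (fun i => PySem.List.pyGetD mmsi i 0))) monthly_list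

-- ===== PRECONDITION & SPEC =====
-- Pre_ excludes exactly the inputs on which Python A raises IndexError: some timelist[i] falls
-- strictly inside the bucket (timestamps[k-1], timestamps[k]) while mmsi[i] or monthly_list[k]
-- does not exist.  (The Lean ports happen to agree even there, since pyGetD totalises both
-- with the same default, so the proof below does not need Pre_; Pre_ is where Python A returns.)
def Pre_monthly_filter (timelist : List Int) (mmsi : List Int) (timestamps : List Int) (monthly_list : List (List Int)) : Prop :=
  ∀ i < timelist.length, ∀ k < timestamps.length, 1 ≤ k →
    (timestamps.getD (k-1) 0 < timelist.getD i 0 ∧ timelist.getD i 0 < timestamps.getD k 0) →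
    i < mmsi.length ∧ k < monthly_list.length
instance (timelist : List Int) (mmsi : List Int) (timestamps : List Int) (monthly_list : List (List Int)) : Decidable (Pre_monthly_filter timelist mmsi timestamps monthly_list) := by unfold Pre_monthly_filter; infer_instance

def pvWitness_monthly_filter : List Int × List Int × List Int × List (List Int) := ([5], [7], [0, 10], [[], []])

def Spec_monthly_filter (timelist : List Int) (mmsi : List Int) (timestamps : List Int) (monthly_list : List (List Int)) (out : List (List Int)) : Prop := out = monthly_filter_alt timelist mmsi timestamps monthly_list
instance (timelist : List Int) (mmsi : List Int) (timestamps : List Int) (monthly_list : List (List Int)) (out : List (List Int)) : Decidable (Spec_monthly_filter timelist mmsi timestamps monthly_list out) := by unfold Spec_monthly_filter; infer_instance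

-- ===== CLAIM (what is proved, stated in full; the proofs are below) =====
def Claim_equal_monthly_filter : Prop := ∀ (timelist : List Int) (mmsi : List Int) (timestamps : List Int) (monthly_list : List (List Int)), Dom_monthly_filter timelist mmsi timestamps monthly_list → Pre_monthly_filter timelist mmsi timestamps monthly_list → Spec_monthly_filter timelist mmsi timestamps monthly_list (monthly_filter timelist mmsi timestamps monthly_list)

-- ===== LEMMAS AND PROOFS =====

-- the per-(i,k) contribution of A's inner loop
def pvGA (timelist mmsi timestamps : List Int) (i j : Int) : List Int :=
  if PySem.List.pyGetD timelist i 0 > PySem.List.pyGetD timestamps (j-1) 0 ∧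
     PySem.List.pyGetD timelist i 0 < PySem.List.pyGetD timestamps j 0
  then [PySem.List.pyGetD mmsi i 0] else []

-- the per-bucket selection and contribution of B
def pvSel (timelist timestamps : List Int) (j : Int) : List Int :=
  PySem.List.sorted
    (PySem.List.slice (pvOrder timelist)
      (some ((PySem.List.bisectRight (pvKeys timelist) (PySem.List.pyGetD timestamps (j-1) 0) : Nat) : Int))
      (some ((PySem.List.bisectLeft (pvKeys timelist) (PySem.List.pyGetD timestamps j 0) : Nat) : Int)))
    (fun x => x) false

def pvGB (timelist mmsi timestamps : List Int) (j : Int) : List Int :=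
  (pvSel timelist timestamps j).map (fun i => PySem.List.pyGetD mmsi i 0)

-- a fold of conditional modifies at distinct nonnegative indices, read back at index k
theorem pv_fold_mod_char (g : Int → List Int) :
    ∀ (js : List Int), (∀ j ∈ js, 0 ≤ j) → js.Nodup → ∀ (ml : List (List Int)) (k : Nat),
    (js.foldl (fun ml j => if (g j).isEmpty then ml else ml.modify j.toNat (fun b => b ++ g j)) ml)[k]?
      = if ((k : Int) ∈ js) then (ml[k]?.map (fun b => b ++ g (k : Int))) else ml[k]? := by
  intro js
  induction js with
  | nil => intro _ _ ml k; simp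
  | cons j js ih =>
    intro hnn hnd ml k
    have hj0 : (0:Int) ≤ j := hnn j (List.mem_cons_self ..)
    have hjns : j ∉ js := (List.nodup_cons.mp hnd).1
    simp only [List.foldl_cons]
    rw [ih (fun x hx => hnn x (List.mem_cons_of_mem _ hx)) (List.nodup_cons.mp hnd).2]
    by_cases hkj : (k : Int) = j
    · have hmem : (k:Int) ∉ js := by rw [hkj]; exact hjns
      have hhead : (k:Int) ∈ j :: js := by simp [hkj]
      rw [if_neg hmem, if_pos hhead]
      by_cases hge : (g j).isEmpty
      · rw [if_pos hge]
        have hgk : g (k:Int) = [] := by rw [hkj]; exact List.isEmpty_iff.mp hge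
        rw [hgk]; cases ml[k]? <;> simp
      · rw [if_neg hge, List.getElem?_modify]
        have hjk : j.toNat = k := by omega
        simp [hjk, hkj]
    · have hmemiff : ((k:Int) ∈ j :: js) ↔ ((k:Int) ∈ js) := by simp [hkj]
      rw [if_congr hmemiff rfl rfl]
      have hstep : (if (g j).isEmpty then ml else ml.modify j.toNat (fun b => b ++ g j))[k]? = ml[k]? := by
        by_cases hge : (g j).isEmpty
        · rw [if_pos hge]
        · rw [if_neg hge, List.getElem?_modify]
          have hne2 : j.toNat ≠ k := by omega
          simp [hne2]
      rw [hstep]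

-- A's inner loop (over buckets j) in canonical form
theorem pv_innerA_char (timelist mmsi timestamps : List Int) (i : Int) (ml : List (List Int)) (k : Nat) :
    ((PySem.List.pyRange 1 (timestamps.length : Int) 1).foldl (fun ml j =>
      if j == 0 then
        (if PySem.List.pyGetD timelist i 0 < PySem.List.pyGetD timestamps (j+1) 0 then
           ml.modify j.toNat (fun b => b ++ [PySem.List.pyGetD mmsi i 0]) else ml)
      else
        (if PySem.List.pyGetD timelist i 0 > PySem.List.pyGetD timestamps (j-1) 0 ∧
            PySem.List.pyGetD timelist i 0 < PySem.List.pyGetD timestamps j 0 then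
           ml.modify j.toNat (fun b => b ++ [PySem.List.pyGetD mmsi i 0]) else ml)) ml)[k]?
    = if ((k : Int) ∈ PySem.List.pyRange 1 (timestamps.length : Int) 1) then
        (ml[k]?.map (fun b => b ++ pvGA timelist mmsi timestamps i (k : Int))) else ml[k]? := by
  rw [PySem.List.foldl_congr_mem (g := fun acc j =>
    if (pvGA timelist mmsi timestamps i j).isEmpty then acc
    else acc.modify j.toNat (fun b => b ++ pvGA timelist mmsi timestamps i j))]
  · exact pv_fold_mod_char _ _ (fun j hj => by
        have := (PySem.List.mem_pyRange_one.mp hj).1; omega)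
      (PySem.List.nodup_pyRange_one _ _) ml k
  · intro acc j hj
    have hj1 : (1:Int) ≤ j := (PySem.List.mem_pyRange_one.mp hj).1
    have hne : (j == 0) = false := by simp; omega
    simp only [hne, Bool.false_eq_true, if_false]
    by_cases hc : PySem.List.pyGetD timelist i 0 > PySem.List.pyGetD timestamps (j-1) 0 ∧
        PySem.List.pyGetD timelist i 0 < PySem.List.pyGetD timestamps j 0
    · rw [if_pos hc]
      have hga : pvGA timelist mmsi timestamps i j = [PySem.List.pyGetD mmsi i 0] := by
        unfold pvGA; rw [if_pos hc]
      rw [hga]; simp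
    · rw [if_neg hc]
      have hga : pvGA timelist mmsi timestamps i j = [] := by
        unfold pvGA; rw [if_neg hc]
      rw [hga]; simp

-- A's outer loop accumulates, per bucket, the concatenation of the per-i contributions
theorem pv_outerA_char (timelist mmsi timestamps : List Int) :
    ∀ (is_ : List Int) (ml : List (List Int)) (k : Nat),
    (is_.foldl (fun ml i =>
      (PySem.List.pyRange 1 (timestamps.length : Int) 1).foldl (fun ml j =>
        if j == 0 then
          (if PySem.List.pyGetD timelist i 0 < PySem.List.pyGetD timestamps (j+1) 0 then
             ml.modify j.toNat (fun b => b ++ [PySem.List.pyGetD mmsi i 0]) else ml)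
        else
          (if PySem.List.pyGetD timelist i 0 > PySem.List.pyGetD timestamps (j-1) 0 ∧
              PySem.List.pyGetD timelist i 0 < PySem.List.pyGetD timestamps j 0 then
             ml.modify j.toNat (fun b => b ++ [PySem.List.pyGetD mmsi i 0]) else ml)) ml) ml)[k]?
    = if ((k : Int) ∈ PySem.List.pyRange 1 (timestamps.length : Int) 1) then
        (ml[k]?.map (fun b => b ++ (is_.map (fun i => pvGA timelist mmsi timestamps i (k : Int))).flatten)) else ml[k]? := by
  intro is_
  induction is_ with
  | nil =>
    intro ml k
    simp only [List.foldl_nil, List.map_nil, List.flatten_nil]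
    split_ifs
    · cases ml[k]? <;> simp
    · rfl
  | cons i is ih =>
    intro ml k
    simp only [List.foldl_cons]
    rw [ih, pv_innerA_char]
    simp only [List.map_cons, List.flatten_cons]
    split_ifs
    · cases ml[k]? <;> simp
    · rfl

-- B read back at index k
theorem pv_B_char (timelist mmsi timestamps : List Int) (ml : List (List Int)) (k : Nat) :
    (monthly_filter_alt timelist mmsi timestamps ml)[k]?
    = if ((k : Int) ∈ PySem.List.pyRange 1 (timestamps.length : Int) 1) then
        (ml[k]?.map (fun b => b ++ pvGB timelist mmsi timestamps (k : Int))) else ml[k]? := by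
  unfold monthly_filter_alt
  rw [PySem.List.foldl_congr_mem (g := fun acc j =>
    if (pvGB timelist mmsi timestamps j).isEmpty then acc
    else acc.modify j.toNat (fun b => b ++ pvGB timelist mmsi timestamps j))]
  · exact pv_fold_mod_char _ _ (fun j hj => by
        have := (PySem.List.mem_pyRange_one.mp hj).1; omega)
      (PySem.List.nodup_pyRange_one _ _) ml k
  · intro acc j _
    show (let sel := pvSel timelist timestamps j;
          if sel.isEmpty then acc
          else acc.modify j.toNat (fun b => b ++ sel.map (fun i => PySem.List.pyGetD mmsi i 0))) = _
    by_cases hse : (pvSel timelist timestamps j).isEmpty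
    · have hgb : (pvGB timelist mmsi timestamps j).isEmpty := by
        unfold pvGB
        rw [List.isEmpty_iff.mp hse]
        rfl
      simp only [hse, hgb, if_true]
    · have hgb : ¬ (pvGB timelist mmsi timestamps j).isEmpty := by
        unfold pvGB
        intro h
        exact hse (by
          rw [List.isEmpty_iff] at h ⊢
          exact List.map_eq_nil_iff.mp h)
      simp only [hse, hgb]
      rfl

-- flatten of one-or-zero-element blocks is a map over a filter
theorem pv_flatten_ite (P : Int → Prop) [DecidablePred P] (f : Int → Int) :
    ∀ (l : List Int),
    (l.map (fun i => if P i then [f i] else [])).flatten = (l.filter (fun i => decide (P i))).map f := by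
  intro l
  induction l with
  | nil => simp
  | cons x xs ih =>
    simp only [List.map_cons, List.flatten_cons, List.filter_cons]
    by_cases hx : P x
    · rw [if_pos hx, if_pos (by simpa using hx)]
      simp [ih]
    · rw [if_neg hx, if_neg (by simpa using hx)]
      simp [ih]

-- membership in the bisected slice of the sorted index list
theorem pv_mem_slice (timelist : List Int) (lo hi x : Int) :
    x ∈ PySem.List.slice (pvOrder timelist)
          (some ((PySem.List.bisectRight (pvKeys timelist) lo : Nat) : Int))
          (some ((PySem.List.bisectLeft (pvKeys timelist) hi : Nat) : Int))
      ↔ (x ∈ pvOrder timelist ∧ lo < PySem.List.pyGetD timelist x 0 ∧ PySem.List.pyGetD timelist x 0 < hi) := by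
  have hpw : List.Pairwise (fun a b => a ≤ b) (pvKeys timelist) :=
    PySem.List.sorted_map_key_pairwise _ _
  obtain ⟨hra, hrb, hrc⟩ := PySem.List.bisectRight_spec (pvKeys timelist) lo hpw
  obtain ⟨hla, hlb, hlc⟩ := PySem.List.bisectLeft_spec (pvKeys timelist) hi hpw
  have hlen : (pvKeys timelist).length = (pvOrder timelist).length := by
    unfold pvKeys; simp
  have hkey : ∀ (p : Nat) (hp : p < (pvOrder timelist).length),
      (pvKeys timelist)[p]'(by omega) = PySem.List.pyGetD timelist ((pvOrder timelist)[p]'hp) 0 := by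
    intro p hp
    unfold pvKeys
    simp
  set a := PySem.List.bisectRight (pvKeys timelist) lo with ha
  set b := PySem.List.bisectLeft (pvKeys timelist) hi with hb
  rw [PySem.List.slice_natCast]
  constructor
  · intro hx
    obtain ⟨q, hq, hxq⟩ := List.getElem_of_mem hx
    have hq' := hq
    rw [List.length_take, List.length_drop] at hq'
    have hqlt : q < b - a := by omega
    have hgetx : (pvOrder timelist)[a + q]? = some x := by
      have h1 : (((pvOrder timelist).drop a).take (b - a))[q]? = some x := by
        rw [List.getElem?_eq_getElem hq, hxq]
      rw [List.getElem?_take, if_pos hqlt, List.getElem?_drop] at h1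
      exact h1
    obtain ⟨hplen, hxp⟩ := List.getElem?_eq_some_iff.mp hgetx
    have hmem : x ∈ pvOrder timelist := hxp ▸ List.getElem_mem hplen
    have hklo : lo < (pvKeys timelist)[a + q]'(by omega) := hrc (a + q) (by omega) (by omega)
    have hkhi : (pvKeys timelist)[a + q]'(by omega) < hi := hlb (a + q) (by omega) (by omega)
    rw [hkey (a + q) hplen, hxp] at hklo hkhi
    exact ⟨hmem, hklo, hkhi⟩
  · rintro ⟨hmem, hxlo, hxhi⟩
    obtain ⟨p, hplen, hxp⟩ := List.getElem_of_mem hmem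
    have hkp : (pvKeys timelist)[p]'(by omega) = PySem.List.pyGetD timelist x 0 := by
      rw [hkey p hplen, hxp]
    have hap : a ≤ p := by
      by_contra hlt
      have := hrb p (by omega) (by omega)
      rw [hkp] at this
      omega
    have hpb : p < b := by
      by_contra hge
      have := hlc p (by omega) (by omega)
      rw [hkp] at this
      omega
    have : (((pvOrder timelist).drop a).take (b - a))[p - a]? = some x := by
      rw [List.getElem?_take, if_pos (by omega), List.getElem?_drop]
      have hpa : a + (p - a) = p := by omega
      rw [hpa, List.getElem?_eq_getElem hplen, hxp]
    exact List.mem_of_getElem? this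

-- B's selected indices for a bucket are exactly the in-range indices, in increasing order
theorem pv_sel_eq (timelist timestamps : List Int) (j : Int) :
    pvSel timelist timestamps j
      = (PySem.List.pyRange 0 (timelist.length : Int) 1).filter
          (fun i => decide (PySem.List.pyGetD timestamps (j-1) 0 < PySem.List.pyGetD timelist i 0 ∧
                            PySem.List.pyGetD timelist i 0 < PySem.List.pyGetD timestamps j 0)) := by
  have hperm0 : (pvOrder timelist).Perm (PySem.List.pyRange 0 (timelist.length : Int) 1) :=
    PySem.List.sorted_perm _ _ _
  have hndR : (PySem.List.pyRange 0 (timelist.length : Int) 1).Nodup :=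
    PySem.List.nodup_pyRange_one _ _
  have hndO : (pvOrder timelist).Nodup := hperm0.nodup_iff.mpr hndR
  have hpwR : (PySem.List.pyRange 0 (timelist.length : Int) 1).Pairwise (· < ·) := by
    rw [PySem.List.pyRange_zero_natCast]
    exact (List.pairwise_lt_range).map _ (fun {m n} h => by exact_mod_cast h)
  apply PySem.List.sorted_eq_of_perm_of_pairwise_lt
  · rw [PySem.List.slice_natCast, List.perm_ext_iff_of_nodup (List.Nodup.filter _ hndR)
      (((List.take_sublist _ _).trans (List.drop_sublist _ _)).nodup hndO)]
    intro y
    rw [List.mem_filter, ← PySem.List.slice_natCast, pv_mem_slice, hperm0.mem_iff]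
    simp
  · exact List.Pairwise.filter _ hpwR

-- per-bucket equality of A's accumulated contributions and B's bisected selection
theorem pv_gag (timelist mmsi timestamps : List Int) (k : Int) :
    ((PySem.List.pyRange 0 (timelist.length : Int) 1).map (fun i => pvGA timelist mmsi timestamps i k)).flatten
    = pvGB timelist mmsi timestamps k := by
  unfold pvGA pvGB
  rw [pv_sel_eq]
  rw [pv_flatten_ite (P := fun i => PySem.List.pyGetD timestamps (k-1) 0 < PySem.List.pyGetD timelist i 0 ∧
        PySem.List.pyGetD timelist i 0 < PySem.List.pyGetD timestamps k 0)
      (f := fun i => PySem.List.pyGetD mmsi i 0)]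

-- ===== VERDICT (by name: the statement is the Claim_ definition above) =====
theorem monthly_filter_spec : Claim_equal_monthly_filter := by
  intro timelist mmsi timestamps monthly_list _ _
  unfold Spec_monthly_filter
  apply List.ext_getElem?
  intro k
  rw [pv_B_char]
  unfold monthly_filter
  rw [pv_outerA_char]
  split_ifs with hmem
  · rw [pv_gag]
  · rfl
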